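-- pv_equiv track=rewrite | github.com/blueletter123456789/atc | abc195/c/c.py | solved
-- ===== SOURCE A (Python) =====
-- def solved(n):
--     """
--     1~999:            0
--     1000~99999:       1
--     1000000~99999999: 2
--     ...
--     """
--     cnt = 0
--     i = 0
--     while 10**(3*(i+1)) <= n:
--         cnt += (10**(3*(i+1)) - 10**(3*i))*i
--         i += 1
--     cnt += (n - (10**(3*i)) + 1)*i
--
--     return cnt
-- ===== SOURCE B (Python) =====
-- def solved(n):
--     cnt = 0
--     i = 1
--     while 10**(3*i) <= n:
--         cnt += n - 10**(3*i) + 1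
--         i += 1
--     return cnt
-- ===== Notes on version B (the rewrite author's own statement) =====
-- stated objective: simpler
-- what changed: Instead of accumulating per-block counts weighted by the block index plus a trailing partial-block term, B sums, for each power-of-thousand threshold not exceeding n, the count of numbers up to n that reach it; no weight multiplier and no leftover term.
import Mathlib
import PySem

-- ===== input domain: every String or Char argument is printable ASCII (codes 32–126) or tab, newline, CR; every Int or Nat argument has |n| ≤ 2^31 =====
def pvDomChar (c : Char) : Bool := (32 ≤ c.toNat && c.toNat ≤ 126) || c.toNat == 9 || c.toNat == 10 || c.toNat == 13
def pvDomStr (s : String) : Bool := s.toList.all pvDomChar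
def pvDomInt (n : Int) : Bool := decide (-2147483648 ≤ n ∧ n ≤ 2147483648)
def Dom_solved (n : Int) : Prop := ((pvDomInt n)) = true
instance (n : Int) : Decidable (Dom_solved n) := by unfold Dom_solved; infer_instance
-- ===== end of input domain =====

-- B replaces A's per-block weighted accumulation by summing, per power-of-thousand threshold, the count of numbers up to n reaching it (simpler decomposition, same cost).
-- Both while-loops are ported with a fuel counter (n.toNat + 1), which is always sufficient: the loop
-- condition 10^(3i) ≤ n forces i ≤ n, so the fuel is never exhausted and the ports compute exactly
-- what their Pythons compute on every n.

-- ===== PORT A =====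
-- A's while-loop: cnt += (10^(3(i+1)) - 10^(3i)) * i while 10^(3(i+1)) <= n
def solvedLoop (n cnt : Int) (i : Nat) : Nat → Int × Nat
  | 0 => (cnt, i)
  | fuel + 1 =>
    if 10 ^ (3 * (i + 1)) ≤ n then
      solvedLoop n (cnt + ((10:Int) ^ (3 * (i + 1)) - 10 ^ (3 * i)) * (i : Int)) (i + 1) fuel
    else (cnt, i)

def solved (n : Int) : Int :=
  let p := solvedLoop n 0 0 (n.toNat + 1)
  p.1 + (n - 10 ^ (3 * p.2) + 1) * (p.2 : Int)

-- ===== PORT B =====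
-- B's while-loop: cnt += n - 10^(3i) + 1 while 10^(3i) <= n, i starting at 1
def altLoop (n cnt : Int) (i : Nat) : Nat → Int
  | 0 => cnt
  | fuel + 1 =>
    if 10 ^ (3 * i) ≤ n then altLoop n (cnt + (n - 10 ^ (3 * i) + 1)) (i + 1) fuel else cnt

def solved_alt (n : Int) : Int := altLoop n 0 1 (n.toNat + 1)

-- ===== PRECONDITION & SPEC =====
def Spec_solved (n : Int) (out : Int) : Prop := out = solved_alt n
instance (n : Int) (out : Int) : Decidable (Spec_solved n out) := by unfold Spec_solved; infer_instance

-- ===== CLAIM (what is proved, stated in full; the proofs are below) =====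
def Claim_equal_solved : Prop := ∀ (n : Int), Dom_solved n → Spec_solved n (solved n)

-- ===== LEMMAS AND PROOFS =====

theorem solved_spec' (n : Int) (h : Dom_solved n) : solved n = solved_alt n := by
  have hdom : n ≤ 2147483648 := by
    simp [Dom_solved, pvDomInt] at h; omega
  rcases lt_or_ge n 1000 with h0 | h0
  · -- no threshold reached: both results are 0
    rw [solved, solved_alt]
    rw [solvedLoop, if_neg (by norm_num <;> omega)]
    rw [altLoop, if_neg (by norm_num <;> omega)]
    norm_num
  · -- n ≥ 1000, so n.toNat + 1 provides at least 4 unfolding steps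
    have hf : n.toNat + 1 = (n.toNat - 3) + 1 + 1 + 1 + 1 := by omega
    rw [solved, solved_alt, hf]
    rcases lt_or_ge n 1000000 with h1 | h1
    · rw [solvedLoop, if_pos (by norm_num <;> omega),
          solvedLoop, if_neg (by norm_num <;> omega)]
      rw [altLoop, if_pos (by norm_num <;> omega),
          altLoop, if_neg (by norm_num <;> omega)]
      norm_num
    rcases lt_or_ge n 1000000000 with h2 | h2
    · rw [solvedLoop, if_pos (by norm_num <;> omega),
          solvedLoop, if_pos (by norm_num <;> omega),
          solvedLoop, if_neg (by norm_num <;> omega)]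
      rw [altLoop, if_pos (by norm_num <;> omega),
          altLoop, if_pos (by norm_num <;> omega),
          altLoop, if_neg (by norm_num <;> omega)]
      norm_num <;> ring
    · rw [solvedLoop, if_pos (by norm_num <;> omega),
          solvedLoop, if_pos (by norm_num <;> omega),
          solvedLoop, if_pos (by norm_num <;> omega),
          solvedLoop, if_neg (by norm_num <;> omega)]
      rw [altLoop, if_pos (by norm_num <;> omega),
          altLoop, if_pos (by norm_num <;> omega),
          altLoop, if_pos (by norm_num <;> omega),
          altLoop, if_neg (by norm_num <;> omega)]
      norm_num <;> ring

-- ===== VERDICT (by name: the statement is the Claim_ definition above) =====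
theorem solved_spec : Claim_equal_solved := by
  intro n h
  exact solved_spec' n h
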